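-- pv_equiv track=rewrite | github.com/fivedaysbefore/path_planning_2 | get_density.py | now_crowd_density
-- ===== SOURCE A (Python) =====
-- def now_crowd_density(list_end_point_used, list_crowd_density):
--     dict_crowd_density_now = {}
--     crowd_density_temp = []
--     used_point = []
--     for i in range(len(list_end_point_used)):
--         crowd_density_temp.append(tuple(list(map(int, (list_end_point_used[i], list_crowd_density[i])))))
--
--     for i, k in enumerate(list_end_point_used):
--         if k in used_point:
--             continue
--         else:
--             used_point.append(k)
--             density = crowd_density_temp[i][1]
--             for j in range(i + 1, len(list_end_point_used)):
--                 if crowd_density_temp[i][0] == crowd_density_temp[j][0]: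
--                     density = density + crowd_density_temp[j][1]
--         dict_crowd_density_now.update({k: density})
--     return dict_crowd_density_now
-- ===== SOURCE B (Python) =====
-- def now_crowd_density(list_end_point_used, list_crowd_density):
--     totals = {}
--     for k, d in zip(list_end_point_used, list_crowd_density):
--         k = int(k)
--         totals[k] = totals.get(k, 0) + int(d)
--     return totals
-- ===== Notes on version B (the rewrite author's own statement) =====
-- stated objective: faster
-- what changed: Replaces A's quadratic scheme (per first occurrence, a membership scan over used keys plus a forward scan summing matching densities) by a single pass that accumulates totals[k] = totals.get(k,0) + d in one dict over zip(endpoints, densities).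
-- outside the precondition, e.g. on now_crowd_density([1, 2], [5]): A raises IndexError, B returns {1: 5}
import Mathlib
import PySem

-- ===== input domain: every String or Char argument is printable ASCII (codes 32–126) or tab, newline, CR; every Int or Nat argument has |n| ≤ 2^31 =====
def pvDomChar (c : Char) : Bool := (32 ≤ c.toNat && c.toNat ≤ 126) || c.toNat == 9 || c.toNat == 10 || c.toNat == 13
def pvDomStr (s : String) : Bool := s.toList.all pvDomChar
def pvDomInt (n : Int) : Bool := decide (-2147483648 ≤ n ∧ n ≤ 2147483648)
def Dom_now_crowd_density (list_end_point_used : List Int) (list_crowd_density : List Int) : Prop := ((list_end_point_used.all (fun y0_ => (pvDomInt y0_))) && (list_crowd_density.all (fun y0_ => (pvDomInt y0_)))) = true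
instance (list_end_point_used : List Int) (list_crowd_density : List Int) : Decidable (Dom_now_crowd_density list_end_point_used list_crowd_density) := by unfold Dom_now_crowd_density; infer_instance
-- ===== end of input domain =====

-- B replaces A's quadratic first-occurrence forward scans by one dict-accumulation pass (return-value equivalence; asymptotically faster).


-- ===== PORT A =====
-- literal transliteration of A: crowd_density_temp built by index, then for each first
-- occurrence sum the matching densities over the forward index range; dict returned as items.
-- list_crowd_density[i] raises IndexError when i >= its length: Pre_ excludes that
-- (the pyGetD default is unreachable inside Pre_).
def pvTempA (list_end_point_used : List Int) (list_crowd_density : List Int) : List (Int × Int) :=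
  (PySem.List.pyRange 0 (list_end_point_used.length : Int) 1).foldl
    (fun acc i =>
      acc ++ [(PySem.List.pyGetD list_end_point_used i 0,
               PySem.List.pyGetD list_crowd_density i 0)]) []

-- body of A's outer loop (temp = crowd_density_temp, n = len(list_end_point_used))
def pvStepA (temp : List (Int × Int)) (n : Int)
    (st : PySem.Dict Int Int × List Int) (ik : Int × Int) : PySem.Dict Int Int × List Int :=
  if st.2.contains ik.2 then st
  else
    let density0 := (PySem.List.pyGetD temp ik.1 (0, 0)).2
    let density :=
      (PySem.List.pyRange (ik.1 + 1) n 1).foldl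
        (fun dens j =>
          if (PySem.List.pyGetD temp ik.1 (0, 0)).1 = (PySem.List.pyGetD temp j (0, 0)).1
          then dens + (PySem.List.pyGetD temp j (0, 0)).2
          else dens)
        density0
    (st.1.insert ik.2 density, st.2 ++ [ik.2])

def now_crowd_density (list_end_point_used : List Int) (list_crowd_density : List Int) : List (Int × Int) :=
  ((PySem.List.enumerate list_end_point_used).foldl
    (pvStepA (pvTempA list_end_point_used list_crowd_density) (list_end_point_used.length : Int))
    (PySem.Dict.empty, [])).1.items

-- ===== PORT B =====
-- one pass: totals[k] = totals.get(k, 0) + d over zip(endpoints, densities)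
def now_crowd_density_alt (list_end_point_used : List Int) (list_crowd_density : List Int) : List (Int × Int) :=
  ((list_end_point_used.zip list_crowd_density).foldl
    (fun (d : PySem.Dict Int Int) p => d.insert p.1 (d.getD p.1 0 + p.2))
    PySem.Dict.empty).items

-- ===== PRECONDITION & SPEC =====
-- Pre_ excludes only the inputs where A raises IndexError (fewer densities than endpoints).
def Pre_now_crowd_density (list_end_point_used : List Int) (list_crowd_density : List Int) : Prop :=
  list_end_point_used.length ≤ list_crowd_density.length
instance (list_end_point_used : List Int) (list_crowd_density : List Int) : Decidable (Pre_now_crowd_density list_end_point_used list_crowd_density) := by unfold Pre_now_crowd_density; infer_instance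
def pvWitness_now_crowd_density : List Int × List Int := ([1, 2, 1, 3], [10, 20, 5, 7])

def Spec_now_crowd_density (list_end_point_used : List Int) (list_crowd_density : List Int) (out : List (Int × Int)) : Prop := out = now_crowd_density_alt list_end_point_used list_crowd_density
instance (list_end_point_used : List Int) (list_crowd_density : List Int) (out : List (Int × Int)) : Decidable (Spec_now_crowd_density list_end_point_used list_crowd_density out) := by unfold Spec_now_crowd_density; infer_instance

-- ===== CLAIM (what is proved, stated in full; the proofs are below) =====
def Claim_equal_now_crowd_density : Prop := ∀ (list_end_point_used : List Int) (list_crowd_density : List Int), Dom_now_crowd_density list_end_point_used list_crowd_density → Pre_now_crowd_density list_end_point_used list_crowd_density → Spec_now_crowd_density list_end_point_used list_crowd_density (now_crowd_density list_end_point_used list_crowd_density)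

-- ===== LEMMAS AND PROOFS =====

-- sum of the densities recorded for key k in the pair list
def pvTot (k : Int) (p : List (Int × Int)) : Int :=
  (p.map (fun q => if q.1 = k then q.2 else 0)).sum

-- the common normal form of both programs: first-occurrence keys with grouped sums
def pvS : List (Int × Int) → List (Int × Int)
  | [] => []
  | (k, v) :: rest => (k, v + pvTot k rest) :: (pvS rest).filter (fun q => q.1 != k)

theorem pvTot_nil (k : Int) : pvTot k [] = 0 := rfl

theorem pvTot_cons (k : Int) (q : Int × Int) (rest : List (Int × Int)) :
    pvTot k (q :: rest) = (if q.1 = k then q.2 else 0) + pvTot k rest := by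
  simp [pvTot]

theorem pvTot_filter (k : Int) (p : List (Int × Int)) (f : Int × Int → Bool)
    (h : ∀ q : Int × Int, q.1 = k → f q = true) :
    pvTot k (p.filter f) = pvTot k p := by
  induction p with
  | nil => rfl
  | cons q rest ih =>
      by_cases hq : q.1 = k
      · simp [h q hq, pvTot_cons, hq, ih]
      · by_cases hf : f q = true <;> simp [hf, pvTot_cons, hq, ih]

theorem pvS_filter (k : Int) (l : List (Int × Int)) :
    pvS (l.filter (fun q => q.1 != k)) = (pvS l).filter (fun q => q.1 != k) := by
  induction l with
  | nil => rfl
  | cons q rest ih =>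
      obtain ⟨k', v⟩ := q
      by_cases hk : k' = k
      · subst hk
        simp [pvS, ih, List.filter_filter]
      · simp only [List.filter_cons]
        have hne : (k' != k) = true := by simp [hk]
        simp only [hne, if_pos, pvS, ih]
        rw [pvTot_filter k' _ _ (by intro q hq; simp [hq, hk])]
        simp [hk, List.filter_filter, Bool.and_comm]

theorem pvS_snd (l : List (Int × Int)) (q : Int × Int) (hq : q ∈ pvS l) :
    q.2 = pvTot q.1 l := by
  induction l with
  | nil => simp [pvS] at hq
  | cons p rest ih =>
      obtain ⟨k, v⟩ := p
      simp only [pvS, List.mem_cons, List.mem_filter] at hq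
      rcases hq with h | ⟨h1, h2⟩
      · subst h; simp [pvTot_cons]
      · have := ih h1
        simp only [bne_iff_ne, ne_eq] at h2
        have h2' : ¬ k = q.1 := fun e => h2 e.symm
        simp [pvTot_cons, h2', this]

theorem pvS_keys_eq (l : List (Int × Int)) :
    pvS l = ((pvS l).map Prod.fst).map (fun k => (k, pvTot k l)) := by
  rw [List.map_map]
  conv_lhs => rw [← List.map_id (pvS l)]
  apply List.map_congr_left
  intro q hq
  have := pvS_snd l q hq
  simp [Function.comp, ← this]

theorem pvS_mem_keys (l : List (Int × Int)) (k : Int) :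
    k ∈ (pvS l).map Prod.fst ↔ k ∈ l.map Prod.fst := by
  induction l with
  | nil => simp [pvS]
  | cons p rest ih =>
      obtain ⟨k', v⟩ := p
      by_cases hk : k = k'
      · subst hk; simp [pvS]
      · simp only [pvS, List.map_cons, List.mem_cons, ← ih]
        constructor
        · rintro (h | h)
          · exact absurd h hk
          · right
            rcases List.mem_map.1 h with ⟨q, hq, rfl⟩
            exact List.mem_map.2 ⟨q, (List.mem_filter.1 hq).1, rfl⟩
        · rintro (h | h)
          · exact absurd h hk
          · right
            rcases List.mem_map.1 h with ⟨q, hq, rfl⟩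
            exact List.mem_map.2 ⟨q, List.mem_filter.2 ⟨hq, by simpa using fun e => hk (by simp [e])⟩, rfl⟩

theorem pvTot_of_not_mem (k : Int) (l : List (Int × Int))
    (h : k ∉ l.map Prod.fst) : pvTot k l = 0 := by
  induction l with
  | nil => rfl
  | cons q rest ih =>
      simp only [List.map_cons, List.mem_cons, not_or] at h
      simp [pvTot_cons, Ne.symm h.1, ih h.2]

-- B's fold characterised
theorem pvB_fold (p : List (Int × Int)) :
    ∀ (d : PySem.Dict Int Int), d.keys.Nodup →
      (p.foldl (fun d q => d.insert q.1 (d.getD q.1 0 + q.2)) d).items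
        = d.items.map (fun q => (q.1, q.2 + pvTot q.1 p))
          ++ pvS (p.filter (fun q => !(d.contains q.1))) := by
  induction p with
  | nil => intro d _; simp [pvTot_nil, pvS]
  | cons q rest ih =>
      intro d hnd
      rw [List.foldl_cons]
      rw [ih (d.insert q.1 (d.getD q.1 0 + q.2)) (PySem.Dict.nodup_keys_insert d q.1 _ hnd)]
      by_cases hc : d.contains q.1 = true
      · rw [PySem.Dict.items_insert_of_contains d _ hc]
        congr 1
        · rw [List.map_map]
          apply List.map_congr_left
          intro r hr
          by_cases hrq : r.1 = q.1
          · have hgd : d.getD r.1 0 = r.2 := PySem.Dict.getD_of_mem_items d (by simpa using hr) hnd 0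
            simp only [Function.comp, hrq, beq_self_eq_true, if_pos]
            rw [hrq] at hgd
            simp [pvTot_cons, ← hgd]
            ring
          · have : (r.1 == q.1) = false := by simp [hrq]
            have hqr : ¬ q.1 = r.1 := fun e => hrq e.symm
            simp [Function.comp, this, pvTot_cons, hqr]
        · rw [List.filter_cons]
          simp only [hc, Bool.not_true, if_neg, Bool.false_eq_true, not_false_iff]
          apply congrArg
          apply List.filter_congr
          intro r _
          by_cases hrq : r.1 = q.1
          · simp [hrq, hc]
          · simp [PySem.Dict.contains_insert, hrq]
      · have hc' : d.contains q.1 = false := by simpa using hc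
        rw [PySem.Dict.items_insert_of_not_contains d _ hc']
        rw [PySem.Dict.getD_of_not_contains d _ hc']
        rw [List.map_append, List.filter_cons]
        simp only [hc', Bool.not_false, if_pos]
        have hfilters : rest.filter (fun r => !((d.insert q.1 (0 + q.2)).contains r.1))
            = (rest.filter (fun r => !(d.contains r.1))).filter (fun r => r.1 != q.1) := by
          rw [List.filter_filter]
          apply List.filter_congr
          intro r _
          by_cases hrq : r.1 = q.1
          · simp [bne, hrq]
          · simp [PySem.Dict.contains_insert, bne]
        rw [hfilters, pvS_filter]
        simp only [pvS]
        rw [pvTot_filter q.1 rest _ (by intro r hr; simp [hr, hc'])]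
        rw [List.append_assoc]
        congr 1
        · apply List.map_congr_left
          intro r hr
          have hrk : r.1 ∈ d.keys := PySem.Dict.mem_keys_of_mem_items d hr
          have hrq : ¬ q.1 = r.1 := by
            intro e
            rw [PySem.Dict.contains_iff_mem_keys d q.1] at hc
            exact hc (e ▸ hrk)
          simp [pvTot_cons, hrq]
        · simp

-- A's loop invariant and remaining lemmas
theorem pvFK_cons (k v : Int) (m : List (Int × Int)) :
    (pvS ((k, v) :: m)).map Prod.fst
      = k :: ((pvS m).map Prod.fst).filter (fun x => x != k) := by
  simp only [pvS, List.map_cons]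
  rw [List.filter_map]
  rfl

theorem pvTot_append (k : Int) (l1 l2 : List (Int × Int)) :
    pvTot k (l1 ++ l2) = pvTot k l1 + pvTot k l2 := by
  simp [pvTot]

theorem pvFK_append (l : List (Int × Int)) (q : Int × Int) :
    (pvS (l ++ [q])).map Prod.fst
      = if q.1 ∈ (pvS l).map Prod.fst then (pvS l).map Prod.fst
        else (pvS l).map Prod.fst ++ [q.1] := by
  induction l with
  | nil => simp [pvS]
  | cons p rest ih =>
      obtain ⟨k, v⟩ := p
      rw [List.cons_append, pvFK_cons, pvFK_cons, ih]
      by_cases hqk : q.1 = k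
      · have hmem : q.1 ∈ k :: ((pvS rest).map Prod.fst).filter (fun x => x != k) := by
          simp [hqk]
        rw [if_pos hmem]
        split_ifs with hm <;> simp [List.filter_append, hqk]
      · have h1 : (q.1 != k) = true := by simp [hqk]
        by_cases hm : q.1 ∈ (pvS rest).map Prod.fst
        · simp [hm, hqk, h1]
        · simp [hm, hqk, h1, List.filter_append]

theorem pvFoldTot (c : Int) (l : List (Int × Int)) :
    ∀ init : Int,
      l.foldl (fun dens q => if c = q.1 then dens + q.2 else dens) init = init + pvTot c l := by
  induction l with
  | nil => intro init; simp [pvTot_nil]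
  | cons q rest ih =>
      intro init
      simp only [List.foldl_cons]
      rw [pvTot_cons]
      by_cases h : c = q.1
      · rw [if_pos h, ih, if_pos h.symm]
        ring
      · rw [if_neg h, ih, if_neg (fun e : q.1 = c => h e.symm)]
        ring

theorem pvTemp_eq (eps cds : List Int) (h : eps.length ≤ cds.length) :
    pvTempA eps cds = eps.zip cds := by
  unfold pvTempA
  rw [PySem.List.foldl_append_singleton_eq_map, List.nil_append]
  apply List.ext_getElem
  · simp [PySem.List.length_pyRange_one, Nat.min_eq_left h]
  · intro k h1 h2
    have hk : k < eps.length := by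
      simpa [PySem.List.length_pyRange_one] using h1
    have hk2 : k < cds.length := lt_of_lt_of_le hk h
    rw [List.getElem_map, PySem.List.getElem_pyRange_one]
    rw [List.getElem_zip]
    have he : (0 : Int) + k = ((k : Nat) : Int) := by ring
    rw [he, PySem.List.pyGetD_natCast, PySem.List.pyGetD_natCast,
        List.getD_eq_getElem _ _ hk, List.getD_eq_getElem _ _ hk2]

theorem pvA_loop (pairs : List (Int × Int)) (rest : List Int) :
    ∀ (t : Nat) (d : PySem.Dict Int Int) (used : List Int),
      rest = (pairs.map Prod.fst).drop t →
      used = (pvS (pairs.take t)).map Prod.fst →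
      d.items = ((pvS (pairs.take t)).map Prod.fst).map (fun k => (k, pvTot k pairs)) →
      (((PySem.List.enumerate rest (t : Int)).foldl
          (pvStepA pairs (pairs.length : Int)) (d, used)).1).items
        = ((pvS pairs).map Prod.fst).map (fun k => (k, pvTot k pairs)) := by
  induction rest with
  | nil =>
      intro t d used hr hu hd
      have hlen : pairs.length ≤ t := by
        by_contra hh
        have := congrArg List.length hr
        simp at this
        omega
      rw [List.take_of_length_le hlen] at hd
      simpa [PySem.List.enumerate] using hd
  | cons x rest' ih =>
      intro t d used hr hu hd
      have ht : t < pairs.length := by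
        by_contra hh
        rw [List.drop_eq_nil_of_le (by simpa using Nat.le_of_not_lt hh)] at hr
        exact List.cons_ne_nil x rest' hr
      have ht' : t < (pairs.map Prod.fst).length := by simpa using ht
      rw [List.drop_eq_getElem_cons ht'] at hr
      injection hr with h1 h2
      have hx : x = pairs[t].1 := by rw [h1, List.getElem_map]
      have hrest' : rest' = (pairs.map Prod.fst).drop (t + 1) := h2
      have htake : pairs.take (t + 1) = pairs.take t ++ [pairs[t]] :=
        List.take_succ_eq_append_getElem ht
      rw [PySem.List.enumerate_cons, List.foldl_cons]
      -- evaluate one step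
      by_cases hmem : x ∈ used
      · have hcont : used.contains x = true := by simpa using hmem
        have hstep : pvStepA pairs (pairs.length : Int) (d, used) ((t : Int), x) = (d, used) := by
          simp [pvStepA, hmem]
        rw [hstep]
        have hcast : ((t : Int) + 1) = (((t + 1 : Nat)) : Int) := by push_cast; ring
        rw [hcast]
        apply ih (t + 1) d used hrest'
        · rw [hu, htake, pvFK_append]
          have : pairs[t].1 ∈ (pvS (pairs.take t)).map Prod.fst := by
            rw [← hx, ← hu]; exact hmem
          simp [this]
        · rw [hd, htake, pvFK_append]
          have : pairs[t].1 ∈ (pvS (pairs.take t)).map Prod.fst := by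
            rw [← hx, ← hu]; exact hmem
          simp [this]
      · have hcont : used.contains x = false := by simpa using hmem
        -- the computed density is the total over all of pairs
        have hnotpre : x ∉ (pairs.take t).map Prod.fst := by
          intro hmm
          exact hmem (hu ▸ ((pvS_mem_keys (pairs.take t) x).2 hmm))
        have hget : PySem.List.pyGetD pairs ((t : Nat) : Int) ((0 : Int), (0 : Int)) = pairs[t] := by
          rw [PySem.List.pyGetD_natCast, List.getD_eq_getElem _ _ ht]
        have hdens :
            (PySem.List.pyRange ((t : Int) + 1) (pairs.length : Int) 1).foldl
              (fun dens j =>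
                if (PySem.List.pyGetD pairs ((t : Int)) ((0 : Int), (0 : Int))).1
                    = (PySem.List.pyGetD pairs j ((0 : Int), (0 : Int))).1
                then dens + (PySem.List.pyGetD pairs j ((0 : Int), (0 : Int))).2
                else dens)
              ((PySem.List.pyGetD pairs ((t : Int)) ((0 : Int), (0 : Int))).2)
            = pvTot x pairs := by
          rw [PySem.List.foldl_pyRange_pyGetD' pairs ((0 : Int), (0 : Int))
                (fun dens q => if (PySem.List.pyGetD pairs ((t : Int)) ((0 : Int), (0 : Int))).1 = q.1
                   then dens + q.2 else dens) _ (by positivity)]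
          rw [hget, pvFoldTot]
          have hsplit : pairs = pairs.take t ++ pairs.drop t := (List.take_append_drop t pairs).symm
          have hdrop2 : pairs.drop t = pairs[t] :: pairs.drop (t + 1) := List.drop_eq_getElem_cons ht
          have htoNat : ((t : Int) + 1).toNat = t + 1 := by omega
          rw [htoNat]
          conv_rhs => rw [hsplit, pvTot_append, hdrop2, pvTot_cons]
          rw [pvTot_of_not_mem x _ hnotpre, hx]
          simp
        have hstep : pvStepA pairs (pairs.length : Int) (d, used) ((t : Int), x)
            = (d.insert x (pvTot x pairs), used ++ [x]) := by
          simp only [pvStepA, hcont, Bool.false_eq_true, if_neg, not_false_iff]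
          rw [hdens]
        rw [hstep]
        have hcast : ((t : Int) + 1) = (((t + 1 : Nat)) : Int) := by push_cast; ring
        rw [hcast]
        have hkeys : d.keys = (pvS (pairs.take t)).map Prod.fst := by
          have : d.keys = d.items.map Prod.fst := by simp only [PySem.Dict.keys]
          rw [this, hd, List.map_map]
          simp [Function.comp]
        have hcontd : d.contains x = false := by
          by_contra hh
          have : d.contains x = true := by simpa using hh
          rw [PySem.Dict.contains_iff_mem_keys d x, hkeys, ← hu] at this
          exact hmem this
        have hnewmem : pairs[t].1 ∉ (pvS (pairs.take t)).map Prod.fst := by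
          rw [← hx, ← hu]; exact hmem
        apply ih (t + 1) _ _ hrest'
        · rw [hu, htake, pvFK_append]
          simp [hnewmem, hx]
        · rw [PySem.Dict.items_insert_of_not_contains d _ hcontd, hd, htake, pvFK_append]
          simp [hnewmem, hx]

theorem pvB_eq (eps cds : List Int) :
    now_crowd_density_alt eps cds = pvS (eps.zip cds) := by
  unfold now_crowd_density_alt
  rw [pvB_fold (eps.zip cds) PySem.Dict.empty (by decide)]
  have hi : (PySem.Dict.empty : PySem.Dict Int Int).items = [] := rfl
  simp [hi, PySem.Dict.contains_empty]

theorem pvA_eq (eps cds : List Int) (h : eps.length ≤ cds.length) :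
    now_crowd_density eps cds = pvS (eps.zip cds) := by
  unfold now_crowd_density
  rw [pvTemp_eq eps cds h]
  have hmain := pvA_loop (eps.zip cds) (((eps.zip cds).map Prod.fst).drop 0) 0
    PySem.Dict.empty [] rfl (by simp [pvS])
    (by simp [pvS, show (PySem.Dict.empty : PySem.Dict Int Int).items = [] from rfl])
  rw [← pvS_keys_eq] at hmain
  simpa [List.map_fst_zip h, List.length_zip, Nat.min_eq_left h] using hmain

-- ===== VERDICT (by name: the statement is the Claim_ definition above) =====
theorem now_crowd_density_spec : Claim_equal_now_crowd_density := by
  intro eps cds _ hpre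
  unfold Spec_now_crowd_density
  rw [pvA_eq eps cds hpre, pvB_eq eps cds]
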